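-- pv_equiv track=rewrite | github.com/Nareeek/Codesignal_tasks | binaryGenerator.py | binaryGenerator
-- ===== SOURCE A (Python) =====
-- def binaryGenerator(s):
--     new = []
--     old = []
--     if s[0] == '1':
--         old = ['1']
--     else:
--         old = ['0', '1']
--     s=s[1::]
--
--     for i in range(0,len(s)):
--         new = []
--         if s[0] == '1':
--             for i in range(len(old)):
--                 new.append(old.pop(0) + '1')
--         else:
--             for i in range(len(old)):
--                 thisVal = old.pop(0)
--                 new.append(thisVal + '1')
--                 new.append(thisVal + '0')
--         s=s[1::]
--         old = [x for x in new]
--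
--     return sorted(old)
-- ===== SOURCE B (Python) =====
-- def binaryGenerator(s):
--     k = sum(1 for c in s if c != '1')
--     out = []
--     for m in range(1 << k):
--         chars = []
--         r = k
--         for c in s:
--             if c == '1':
--                 chars.append('1')
--             else:
--                 r -= 1
--                 chars.append('1' if (m >> r) & 1 else '0')
--         out.append(''.join(chars))
--     return out
-- ===== Notes on version B (the rewrite author's own statement) =====
-- stated objective: alternative
-- what changed: Replaces A's incremental pop(0)-and-append doubling loop plus final sort with a bitmask counter: one integer m per output string whose bits (MSB-first) fill the non-'1' positions, so the results are emitted directly in sorted order with no sort and no intermediate lists.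
import Mathlib
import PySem

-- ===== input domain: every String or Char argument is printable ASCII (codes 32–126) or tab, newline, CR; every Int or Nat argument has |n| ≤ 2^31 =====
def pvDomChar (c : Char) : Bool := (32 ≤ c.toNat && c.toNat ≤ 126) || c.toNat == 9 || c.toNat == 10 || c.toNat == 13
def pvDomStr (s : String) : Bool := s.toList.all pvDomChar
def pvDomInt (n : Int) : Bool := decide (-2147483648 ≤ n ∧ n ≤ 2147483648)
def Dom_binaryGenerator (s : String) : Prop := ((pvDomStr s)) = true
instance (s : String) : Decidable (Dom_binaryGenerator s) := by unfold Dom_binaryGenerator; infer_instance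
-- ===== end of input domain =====

-- B replaces A's incremental pop(0)-doubling-then-sort loop with a bitmask counter: one
-- integer m per output string, free positions read m's bits MSB-first, so the list comes
-- out already in sorted order with no sort and no intermediate lists (objective: alternative).

-- ===== PORT A =====
-- inner pass `for i in range(len(old)): new.append(old.pop(0) + '1')`
def aAppendOne : List String → List String
  | [] => []
  | v :: rest => (v ++ "1") :: aAppendOne rest

-- inner pass popping each element and appending both '1' and '0' (in that order)
def aAppendBoth : List String → List String
  | [] => []
  | v :: rest => (v ++ "1") :: (v ++ "0") :: aAppendBoth rest

-- `for i in range(0, len(s))`: one iteration per remaining character, consumed in order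
def aLoop : List Char → List String → List String
  | [], old => old
  | c :: cs, old => aLoop cs (if c = '1' then aAppendOne old else aAppendBoth old)

def binaryGenerator (s : String) : List String :=
  match s.toList with
  | [] => []   -- Python A raises IndexError at s[0] here; excluded by Pre_
  | c :: cs =>
    let old : List String := if c = '1' then ["1"] else ["0", "1"]
    PySem.List.sorted (aLoop cs old) (fun x => x) false

-- ===== PORT B =====
-- inner `for c in s` loop of Source B: '1' is kept, any other char consumes the next bit of m
-- (r counts the free slots still ahead, so bit r-1 is the current one, MSB first)
def bRow : List Char → Nat → Nat → List Char
  | [], _, _ => []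
  | c :: cs, m, r =>
    if c = '1' then '1' :: bRow cs m r
    else (if (m >>> (r - 1)) % 2 = 1 then '1' else '0') :: bRow cs m (r - 1)

-- `k = sum(1 for c in s if c != '1')`, then `for m in range(1 << k): out.append(''.join(chars))`
def binaryGenerator_alt (s : String) : List String :=
  let k := s.toList.countP (fun c => c != '1')
  (List.range (1 <<< k)).map (fun m => String.ofList (bRow s.toList m k))

-- ===== PRECONDITION & SPEC =====
-- Pre_ excludes only the empty string, on which A raises IndexError at s[0].
def Pre_binaryGenerator (s : String) : Prop := s ≠ ""
instance (s : String) : Decidable (Pre_binaryGenerator s) := by unfold Pre_binaryGenerator; infer_instance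
def pvWitness_binaryGenerator : String := "10"

def Spec_binaryGenerator (s : String) (out : List String) : Prop := out = binaryGenerator_alt s
instance (s : String) (out : List String) : Decidable (Spec_binaryGenerator s out) := by unfold Spec_binaryGenerator; infer_instance

-- ===== CLAIM (what is proved, stated in full; the proofs are below) =====
def Claim_equal_binaryGenerator : Prop := ∀ (s : String), Dom_binaryGenerator s → Pre_binaryGenerator s → Spec_binaryGenerator s (binaryGenerator s)

-- ===== LEMMAS AND PROOFS =====

-- proof-side description of A's expansion: per-position choices and their lexicographic product
def bChoices (cs : List Char) : List (List String) :=
  cs.map (fun c => if c = '1' then ["1"] else ["0", "1"])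

def bProduct : List (List String) → List String
  | [] => [""]
  | ch :: rest => ch.flatMap (fun x => (bProduct rest).map (fun t => x ++ t))

lemma aAppendOne_eq_map (old : List String) : aAppendOne old = old.map (· ++ "1") := by
  induction old with
  | nil => rfl
  | cons v rest ih => simp [aAppendOne, ih]

lemma aAppendBoth_eq_flatMap (old : List String) :
    aAppendBoth old = old.flatMap (fun v => [v ++ "1", v ++ "0"]) := by
  induction old with
  | nil => rfl
  | cons v rest ih => simp [aAppendBoth, ih]

lemma aLoop_perm (cs : List Char) : ∀ old : List String,
    (aLoop cs old).Perm (old.flatMap (fun v => (bProduct (bChoices cs)).map (fun t => v ++ t))) := by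
  induction cs with
  | nil =>
      intro old
      simp [aLoop, bChoices, bProduct]
  | cons c cs ih =>
      intro old
      show (aLoop cs (if c = '1' then aAppendOne old else aAppendBoth old)).Perm _
      refine ((ih _).trans ?_)
      by_cases hc : c = '1'
      · apply List.Perm.of_eq
        simp only [aAppendOne_eq_map, List.flatMap_map, bChoices, List.map_cons,
          if_pos hc, bProduct, List.flatMap_cons, List.flatMap_nil, List.append_nil]
        rw [← bChoices]
        congr 1
        funext v
        simp [Function.comp_def, List.map_map, String.append_assoc]
      · simp only [aAppendBoth_eq_flatMap, List.flatMap_assoc, bChoices,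
          List.map_cons, if_neg hc, bProduct, List.flatMap_cons, List.flatMap_nil,
          List.append_nil]
        rw [← bChoices]
        apply List.Perm.flatMap_left
        intro v _
        simp only [List.map_append, List.map_map]
        refine (List.perm_append_comm).trans (List.Perm.of_eq ?_)
        congr 1 <;>
          · apply List.map_congr_left
            intro t _
            simp [String.append_assoc]

lemma head_flatMap_eq_bProduct (c : Char) (cs : List Char) :
    ((if c = '1' then (["1"] : List String) else ["0", "1"]).flatMap
      (fun v => (bProduct (bChoices cs)).map (fun t => v ++ t)))
      = bProduct (bChoices (c :: cs)) := by
  by_cases hc : c = '1' <;> simp [bChoices, bProduct, hc]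

-- bRow only reads bits below r of m, provided r bounds the number of free slots
lemma bRow_add_mul_pow : ∀ (cs : List Char) (m t r : Nat),
    cs.countP (fun c => c != '1') ≤ r → bRow cs (m + t * 2 ^ r) r = bRow cs m r := by
  intro cs
  induction cs with
  | nil => intro m t r _; rfl
  | cons c cs ih =>
      intro m t r h
      by_cases hc : c = '1'
      · have h' : cs.countP (fun c => c != '1') ≤ r := by
          simpa [hc] using h
        simp [bRow, hc, ih m t r h']
      · have h1 : 1 ≤ r := by
          have := h; simp [hc] at this; omega
        have h' : cs.countP (fun c => c != '1') ≤ r - 1 := by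
          have := h; simp [hc] at this; omega
        have hsplit : m + t * 2 ^ r = m + (2 * t) * 2 ^ (r - 1) := by
          have h2 : (2 : Nat) ^ r = 2 * 2 ^ (r - 1) := by
            conv_lhs => rw [show r = (r - 1) + 1 by omega]
            ring
          rw [h2]; ring
        have hbit : ((m + t * 2 ^ r) >>> (r - 1)) % 2 = (m >>> (r - 1)) % 2 := by
          rw [hsplit, Nat.shiftRight_eq_div_pow, Nat.shiftRight_eq_div_pow,
            Nat.add_mul_div_right _ _ (Nat.two_pow_pos _)]
          omega
        simp only [bRow, if_neg hc, hbit]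
        rw [hsplit, ih m (2 * t) (r - 1) h']

lemma bProduct_eq_rangeMap : ∀ cs : List Char,
    bProduct (bChoices cs)
      = (List.range (2 ^ (cs.countP (fun c => c != '1')))).map
          (fun m => String.ofList (bRow cs m (cs.countP (fun c => c != '1')))) := by
  intro cs
  induction cs with
  | nil => rfl
  | cons c cs ih =>
      set k := cs.countP (fun c => c != '1') with hk
      by_cases hc : c = '1'
      · have hcnt : (c :: cs).countP (fun c => c != '1') = k := by
          simp [hc, hk]
        rw [← head_flatMap_eq_bProduct, if_pos hc, hcnt]
        simp only [List.flatMap_cons, List.flatMap_nil, List.append_nil, ih, List.map_map]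
        apply List.map_congr_left
        intro m _
        simp only [Function.comp_apply, bRow, hc]
        apply String.toList_injective
        simp
      · have hcnt : (c :: cs).countP (fun c => c != '1') = k + 1 := by
          simp [hc, hk]
        rw [← head_flatMap_eq_bProduct, if_neg hc, hcnt]
        have hr : (2 : Nat) ^ (k + 1) = 2 ^ k + 2 ^ k := by ring
        rw [hr, List.range_add, List.map_append]
        simp only [List.flatMap_cons, List.flatMap_nil, List.append_nil, ih, List.map_map]
        congr 1
        · -- first half: bit k of m is 0
          apply List.map_congr_left
          intro m hm
          have hm' : m < 2 ^ k := List.mem_range.mp hm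
          have hbit : (m >>> k) % 2 = 0 := by
            rw [Nat.shiftRight_eq_div_pow, Nat.div_eq_of_lt hm']
          simp only [Function.comp_apply, bRow, if_neg hc, Nat.add_sub_cancel, hbit]
          apply String.toList_injective
          simp
        · -- second half: m = 2^k + j, bit k is 1, lower bits are j's
          apply List.map_congr_left
          intro j hj
          have hj' : j < 2 ^ k := List.mem_range.mp hj
          have hbit : ((2 ^ k + j) >>> k) % 2 = 1 := by
            rw [Nat.shiftRight_eq_div_pow, Nat.add_comm,
              Nat.add_div_right _ (Nat.two_pow_pos _),
              Nat.div_eq_of_lt hj']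
          have hlow : bRow cs (2 ^ k + j) k = bRow cs j k := by
            have := bRow_add_mul_pow cs j 1 k (le_of_eq hk.symm)
            simpa [Nat.add_comm] using this
          simp only [Function.comp_apply, bRow, if_neg hc, Nat.add_sub_cancel, hbit, hlow]
          apply String.toList_injective
          simp

lemma bProduct_pairwise : ∀ cs : List Char, (bProduct (bChoices cs)).Pairwise (· < ·) := by
  intro cs
  induction cs with
  | nil => simp [bChoices, bProduct]
  | cons c cs ih =>
      have hmap : ∀ p : String,
          ((bProduct (bChoices cs)).map (fun t => p ++ t)).Pairwise (· < ·) := by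
        intro p
        refine List.Pairwise.map _ ?_ ih
        intro x y hxy
        rw [String.lt_iff_toList_lt]
        simp only [String.toList_append]
        exact List.append_left_lt (String.lt_iff_toList_lt.mp hxy)
      by_cases hc : c = '1'
      · rw [← head_flatMap_eq_bProduct, if_pos hc]
        simp only [List.flatMap_cons, List.flatMap_nil, List.append_nil]
        exact hmap "1"
      · rw [← head_flatMap_eq_bProduct, if_neg hc]
        simp only [List.flatMap_cons, List.flatMap_nil, List.append_nil]
        rw [List.pairwise_append]
        refine ⟨hmap "0", hmap "1", ?_⟩
        intro x hx y hy
        obtain ⟨x', _, rfl⟩ := List.mem_map.mp hx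
        obtain ⟨y', _, rfl⟩ := List.mem_map.mp hy
        rw [String.lt_iff_toList_lt]
        have hx0 : (("0" : String) ++ x').toList = '0' :: x'.toList := by simp
        have hy1 : (("1" : String) ++ y').toList = '1' :: y'.toList := by simp
        rw [hx0, hy1, ← List.lex_lt]
        exact List.Lex.rel (by decide)

-- ===== VERDICT (by name: the statement is the Claim_ definition above) =====
theorem binaryGenerator_spec : Claim_equal_binaryGenerator := by
  intro s _ hpre
  unfold Spec_binaryGenerator binaryGenerator binaryGenerator_alt
  have hne : s.toList ≠ [] := fun h => hpre (String.toList_eq_nil_iff.mp h)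
  rcases hlist : s.toList with _ | ⟨c, cs⟩
  · exact absurd hlist hne
  · show PySem.List.sorted (aLoop cs (if c = '1' then ["1"] else ["0", "1"])) (fun x => x) false =
      (List.range (1 <<< ((c :: cs).countP (fun c => c != '1')))).map
        (fun m => String.ofList (bRow (c :: cs) m ((c :: cs).countP (fun c => c != '1'))))
    rw [Nat.one_shiftLeft, ← bProduct_eq_rangeMap]
    refine PySem.List.sorted_eq_of_perm_of_pairwise_lt _ _ _ ?_ ?_
    · exact ((aLoop_perm cs _).trans (List.Perm.of_eq (head_flatMap_eq_bProduct c cs))).symm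
    · exact bProduct_pairwise (c :: cs)
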